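-- pv_equiv track=rewrite | github.com/messpy/Voice-Agent | tools/cohere_phrase_test.py | resolve_phrase_alias_target
-- ===== SOURCE A (Python) =====
-- def normalize_text(text: str) -> str:
--     return " ".join(str(text).replace("\u3000", " ").split()).strip()
--
-- def resolve_phrase_alias_target(recognized: str, alias_map: dict[str, set[str]]) -> tuple[str, bool]:
--     body = normalize_text(recognized)
--     if not body:
--         return "", False
--     if body in alias_map:
--         return body, False
--     for target, aliases in alias_map.items():
--         if body in aliases:
--             return target, True
--     return body, False
-- ===== SOURCE B (Python) =====
-- def normalize_text(text: str) -> str: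
--     return " ".join(str(text).replace("\u3000", " ").split()).strip()
--
-- def resolve_phrase_alias_target(recognized: str, alias_map: dict[str, set[str]]) -> tuple[str, bool]:
--     # Precompute an inverted index alias -> target (first target in iteration order wins),
--     # then resolve with dictionary lookups instead of scanning alias sets.
--     index = {}
--     for target, aliases in alias_map.items():
--         for alias in aliases:
--             index.setdefault(alias, target)
--     body = normalize_text(recognized)
--     if not body:
--         return "", False
--     if body in alias_map:
--         return body, False
--     if body in index:
--         return index[body], True
--     return body, False
-- ===== Notes on version B (the rewrite author's own statement) =====
-- stated objective: alternative
-- what changed: B precomputes an inverted index dict alias->target with setdefault (first target wins) and resolves by a single dict lookup, instead of A's linear scan over alias sets per call.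
import Mathlib
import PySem

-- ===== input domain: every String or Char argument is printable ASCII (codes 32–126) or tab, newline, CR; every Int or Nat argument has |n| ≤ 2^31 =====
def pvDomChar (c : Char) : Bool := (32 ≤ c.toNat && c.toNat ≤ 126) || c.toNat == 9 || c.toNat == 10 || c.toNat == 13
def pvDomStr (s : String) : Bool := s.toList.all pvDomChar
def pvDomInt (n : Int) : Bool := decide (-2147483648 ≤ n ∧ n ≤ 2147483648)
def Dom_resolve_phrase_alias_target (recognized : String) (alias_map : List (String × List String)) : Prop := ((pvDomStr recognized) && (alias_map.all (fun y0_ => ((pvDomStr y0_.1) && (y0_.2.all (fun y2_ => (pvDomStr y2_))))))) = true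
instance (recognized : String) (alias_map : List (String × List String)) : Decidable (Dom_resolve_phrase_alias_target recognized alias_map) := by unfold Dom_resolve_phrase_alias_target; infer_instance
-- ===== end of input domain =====

-- B replaces A's per-call scan over alias sets by a precomputed inverted index
-- (alias -> target, first target wins) consulted with one dictionary lookup.

-- ===== PORT A =====
-- normalize_text(text) = " ".join(str(text).replace("\u3000", " ").split()).strip()
def normPhrase (text : String) : String :=
  PySem.Str.strip (PySem.Str.join " " (PySem.Str.split₀ (PySem.Str.replace text "\u3000" " ")))

-- for target, aliases in alias_map.items(): if body in aliases: return target, True / fallthrough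
def resolveLoopA (body : String) : List (String × List String) → String × Bool
  | [] => (body, false)
  | (target, aliases) :: rest =>
      if aliases.contains body then (target, true) else resolveLoopA body rest

def resolve_phrase_alias_target (recognized : String) (alias_map : List (String × List String)) : String × Bool :=
  let body := normPhrase recognized
  if body = "" then ("", false)
  else if alias_map.any (fun p => p.1 == body) then (body, false)
  else resolveLoopA body alias_map

-- ===== PORT B =====
-- index = {}; for target, aliases: for alias in aliases: index.setdefault(alias, target)
def buildIndex (alias_map : List (String × List String)) : PySem.Dict String String :=
  alias_map.foldl (fun d p => p.2.foldl (fun d a => d.setdefault a p.1) d) PySem.Dict.empty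

def resolve_phrase_alias_target_alt (recognized : String) (alias_map : List (String × List String)) : String × Bool :=
  let index := buildIndex alias_map
  let body := normPhrase recognized
  if body = "" then ("", false)
  else if alias_map.any (fun p => p.1 == body) then (body, false)
  else
    match index.get? body with
    | some target => (target, true)
    | none => (body, false)

-- ===== PRECONDITION & SPEC =====
def Spec_resolve_phrase_alias_target (recognized : String) (alias_map : List (String × List String)) (out : String × Bool) : Prop := out = resolve_phrase_alias_target_alt recognized alias_map
instance (recognized : String) (alias_map : List (String × List String)) (out : String × Bool) : Decidable (Spec_resolve_phrase_alias_target recognized alias_map out) := by unfold Spec_resolve_phrase_alias_target; infer_instance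

-- ===== CLAIM (what is proved, stated in full; the proofs are below) =====
def Claim_equal_resolve_phrase_alias_target : Prop := ∀ (recognized : String) (alias_map : List (String × List String)), Dom_resolve_phrase_alias_target recognized alias_map → Spec_resolve_phrase_alias_target recognized alias_map (resolve_phrase_alias_target recognized alias_map)

-- ===== LEMMAS AND PROOFS =====

-- the first target (in iteration order) whose alias set contains body
def firstTarget (body : String) : List (String × List String) → Option String
  | [] => none
  | (target, aliases) :: rest =>
      if body ∈ aliases then some target else firstTarget body rest

lemma get?_foldl_setdefault (al : List String) (t body : String) :
    ∀ d : PySem.Dict String String,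
      (al.foldl (fun d a => d.setdefault a t) d).get? body =
        (d.get? body).or (if body ∈ al then some t else none) := by
  induction al with
  | nil => intro d; simp
  | cons a rest ih =>
    intro d
    simp only [List.foldl_cons, ih]
    by_cases hc : d.contains a = true
    · rw [PySem.Dict.setdefault_of_contains d t hc]
      by_cases hba : body = a
      · have hs : (d.get? body).isSome = true := by
          rw [hba, ← PySem.Dict.contains_eq_isSome_get? d a]; exact hc
        obtain ⟨v, hv⟩ := Option.isSome_iff_exists.mp hs
        simp [hv]
      · simp [List.mem_cons, hba]
    · rw [PySem.Dict.setdefault_of_not_contains d t (by simpa using hc)]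
      rw [PySem.Dict.get?_insert]
      by_cases hba : body = a
      · have hn : d.get? a = none := by
          cases hg : d.get? a with
          | none => rfl
          | some v =>
            exact absurd (by rw [PySem.Dict.contains_eq_isSome_get? d a, hg]; rfl) hc
        simp [hba, hn]
      · simp [hba, List.mem_cons]

lemma get?_buildIndex_fold (body : String) :
    ∀ (l : List (String × List String)) (d : PySem.Dict String String),
      (l.foldl (fun d p => p.2.foldl (fun d a => d.setdefault a p.1) d) d).get? body =
        (d.get? body).or (firstTarget body l) := by
  intro l
  induction l with
  | nil => intro d; simp [firstTarget]
  | cons p rest ih =>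
    intro d
    obtain ⟨t, al⟩ := p
    simp only [List.foldl_cons, ih, get?_foldl_setdefault, Option.or_assoc, firstTarget]
    by_cases h : body ∈ al <;> simp [h]

lemma get?_buildIndex (body : String) (alias_map : List (String × List String)) :
    (buildIndex alias_map).get? body = firstTarget body alias_map := by
  unfold buildIndex
  rw [get?_buildIndex_fold]
  simp

lemma resolveLoopA_eq_firstTarget (body : String) (l : List (String × List String)) :
    resolveLoopA body l =
      match firstTarget body l with
      | some target => (target, true)
      | none => (body, false) := by
  induction l with
  | nil => simp [resolveLoopA, firstTarget]
  | cons p rest ih =>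
    obtain ⟨t, al⟩ := p
    by_cases h : body ∈ al <;>
      simp [resolveLoopA, firstTarget, h, ih]

-- ===== VERDICT (by name: the statement is the Claim_ definition above) =====
theorem resolve_phrase_alias_target_spec : Claim_equal_resolve_phrase_alias_target := by
  intro recognized alias_map _
  unfold Spec_resolve_phrase_alias_target
  unfold resolve_phrase_alias_target resolve_phrase_alias_target_alt
  simp only [get?_buildIndex, resolveLoopA_eq_firstTarget]
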